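-- pv_equiv track=rewrite | github.com/seoyun-dev/Studying | Python/python_HUBO_23_1/problem2_sol.py | datacat2
-- ===== SOURCE A (Python) =====
-- def datacat2(L):
--     result={}
--     Num_to_Eng={1:'one', 2:'two', 3:'three', 4:'four', 5:'five'}
--     for l in L:
--         if len(l) in result:
--             result[len(l)]+=1
--         else:
--             result[len(l)]=1
--     for key in result:
--         result[key]=Num_to_Eng[result[key]]
--     return result
-- ===== SOURCE B (Python) =====
-- def datacat2(L):
--     Num_to_Eng = {1: 'one', 2: 'two', 3: 'three', 4: 'four', 5: 'five'}
--     result = {}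
--     lengths = [len(s) for s in L]
--     while lengths:
--         n = lengths[0]
--         result[n] = Num_to_Eng[lengths.count(n)]
--         lengths = [m for m in lengths[1:] if m != n]
--     return result
-- ===== Notes on version B (the rewrite author's own statement) =====
-- stated objective: alternative
-- what changed: B replaces A's incremental tally dict plus second value-rewriting loop with a worklist peeling algorithm: it repeatedly takes the first remaining length, emits its group via one count scan, and filters every occurrence of that length out of the shrinking worklist.
import Mathlib
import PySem

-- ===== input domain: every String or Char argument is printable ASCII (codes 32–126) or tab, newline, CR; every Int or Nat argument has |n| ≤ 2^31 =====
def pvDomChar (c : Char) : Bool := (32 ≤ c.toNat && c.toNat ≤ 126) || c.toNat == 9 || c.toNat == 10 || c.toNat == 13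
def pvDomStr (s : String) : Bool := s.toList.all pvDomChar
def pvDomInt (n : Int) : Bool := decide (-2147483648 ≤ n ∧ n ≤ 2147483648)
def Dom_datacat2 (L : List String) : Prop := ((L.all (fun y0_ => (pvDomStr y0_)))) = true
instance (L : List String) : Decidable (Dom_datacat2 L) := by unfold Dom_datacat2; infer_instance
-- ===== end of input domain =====

-- B replaces A's incremental tally + second rewrite loop with a worklist peeling loop:
-- take the first remaining length, emit its group via one count scan, filter all its
-- occurrences out of the shrinking worklist (objective: alternative; same return value).

-- ===== PORT A =====
-- Num_to_Eng = {1:'one', …, 5:'five'}; lookup Num_to_Eng[c] raises KeyError for c ∉ 1..5,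
-- excluded by Pre_datacat2, so the port totalises it with getD "" (unreachable under Pre_).
def numToEng : PySem.Dict Int String :=
  PySem.Dict.ofList [((1 : Int), "one"), (2, "two"), (3, "three"), (4, "four"), (5, "five")]

def datacat2 (L : List String) : List (Int × String) :=
  -- first loop: tally of len(l) in insertion order
  let counts : PySem.Dict Int Int :=
    L.foldl (fun d l =>
      if d.contains (PySem.Str.len l) then d.modify (PySem.Str.len l) 0 (· + 1)
      else d.insert (PySem.Str.len l) 1) PySem.Dict.empty
  -- second loop: result[key] = Num_to_Eng[result[key]] for each key in order
  counts.items.map (fun p => (p.1, numToEng.getD p.2 ""))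

-- ===== PORT B =====
-- the while loop of Source B: peel the first length's whole group off the worklist each round
def datacat2Loop (lengths : List Int) (result : PySem.Dict Int String) :
    PySem.Dict Int String :=
  match lengths with
  | [] => result
  | n :: rest =>
    datacat2Loop (rest.filter (fun m => m != n))
      (result.insert n (numToEng.getD (PySem.List.count (n :: rest) n) ""))
termination_by lengths.length
decreasing_by
  simpa using Nat.lt_succ_of_le (List.length_filter_le _ rest)

def datacat2_alt (L : List String) : List (Int × String) :=
  (datacat2Loop (L.map PySem.Str.len) PySem.Dict.empty).items

-- ===== PRECONDITION & SPEC =====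
-- Pre_ excludes exactly the inputs where some length occurs more than 5 times: there the
-- Python A (and B alike) raises KeyError in Num_to_Eng, returning no value.
def Pre_datacat2 (L : List String) : Prop :=
  ∀ s ∈ L, (L.map PySem.Str.len).count (PySem.Str.len s) ≤ 5
instance (L : List String) : Decidable (Pre_datacat2 L) := by unfold Pre_datacat2; infer_instance

def pvWitness_datacat2 : List String := ["a", "bb", "cc", "", "ddd"]

def Spec_datacat2 (L : List String) (out : List (Int × String)) : Prop := out = datacat2_alt L
instance (L : List String) (out : List (Int × String)) : Decidable (Spec_datacat2 L out) := by unfold Spec_datacat2; infer_instance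

-- ===== CLAIM (what is proved, stated in full; the proofs are below) =====
def Claim_equal_datacat2 : Prop := ∀ (L : List String), Dom_datacat2 L → Pre_datacat2 L → Spec_datacat2 L (datacat2 L)

-- ===== LEMMAS AND PROOFS =====

-- A's tally step is exactly the Counter step (the else-branch inserts 1 = 0 + 1 at the end).
theorem tally_step_eq_modify (d : PySem.Dict Int Int) (k : Int) :
    (if d.contains k then d.modify k 0 (· + 1) else d.insert k 1) = d.modify k 0 (· + 1) := by
  by_cases h : d.contains k
  · simp [h]
  · have h' : d.contains k = false := by simpa using h
    simp [h', PySem.Dict.modify, PySem.Dict.insert, PySem.Dict.getD_of_not_contains d 0 h']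

-- updating with a list changes nothing for elements already in the set: duplicates of n drop out
theorem update_filter_of_mem (n : Int) (xs : List Int) :
    ∀ s : PySem.Set Int, n ∈ s →
      PySem.Set.update s xs = PySem.Set.update s (xs.filter (fun m => m != n)) := by
  induction xs with
  | nil => intro s _; rfl
  | cons x xs ih =>
    intro s hn
    by_cases hx : x = n
    · subst hx
      rw [PySem.Set.update_cons, PySem.Set.add_of_mem hn, List.filter_cons_of_neg (by simp)]
      exact ih s hn
    · rw [PySem.Set.update_cons, List.filter_cons_of_pos (by simp [hx]), PySem.Set.update_cons]
      exact ih _ (by simp [PySem.Set.mem_add, hn])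

-- a head element absent from the update list commutes out of the accumulator
theorem update_cons_head (a : Int) (ys : List Int) (ha : a ∉ ys) :
    ∀ s : List Int, PySem.Set.update (a :: s) ys = a :: PySem.Set.update s ys := by
  induction ys with
  | nil => intro s; rfl
  | cons y ys ih =>
    intro s
    have hya : y ≠ a := by rintro rfl; exact ha List.mem_cons_self
    have ha' : a ∉ ys := fun h => ha (List.mem_cons_of_mem _ h)
    rw [PySem.Set.update_cons, PySem.Set.update_cons]
    have hadd : PySem.Set.add (a :: s) y = a :: PySem.Set.add s y := by
      by_cases hy : y ∈ s
      · rw [PySem.Set.add_of_mem (by simp [hy]), PySem.Set.add_of_mem hy]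
      · rw [PySem.Set.add_of_not_mem (by simp [hya, hy]), PySem.Set.add_of_not_mem hy]; rfl
    rw [hadd]
    exact ih ha' _
  
-- first-occurrence order survives peeling: set(n::xs) = n :: set(xs without n)
theorem ofList_cons_filter (n : Int) (xs : List Int) :
    PySem.Set.ofList (n :: xs) = n :: PySem.Set.ofList (xs.filter (fun m => m != n)) := by
  have h1 : PySem.Set.ofList (n :: xs) = PySem.Set.update [n] xs := by
    rw [PySem.Set.ofList_eq_foldl, List.foldl_cons]; rfl
  have h2 : PySem.Set.update [n] xs = PySem.Set.update [n] (xs.filter (fun m => m != n)) :=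
    update_filter_of_mem n xs [n] (by simp)
  have h3 : n ∉ xs.filter (fun m => m != n) := by simp
  rw [h1, h2, update_cons_head n _ h3 []]
  rfl

-- the pure shape of B's loop: the (key, count) groups it peels off, in order
def groups (xs : List Int) : List (Int × Int) :=
  match xs with
  | [] => []
  | n :: rest => (n, PySem.List.count (n :: rest) n) :: groups (rest.filter (fun m => m != n))
termination_by xs.length
decreasing_by
  simpa using Nat.lt_succ_of_le (List.length_filter_le _ rest)

theorem groups_nil : groups [] = [] := by rw [groups.eq_def]

theorem groups_cons (n : Int) (rest : List Int) :
    groups (n :: rest)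
      = (n, (PySem.List.count (n :: rest) n : Int)) :: groups (rest.filter (fun m => m != n)) := by
  rw [groups.eq_def]

theorem datacat2Loop_nil (d : PySem.Dict Int String) : datacat2Loop [] d = d := by
  rw [datacat2Loop.eq_def]

theorem datacat2Loop_cons (n : Int) (rest : List Int) (d : PySem.Dict Int String) :
    datacat2Loop (n :: rest) d
      = datacat2Loop (rest.filter (fun m => m != n))
          (d.insert n (numToEng.getD (PySem.List.count (n :: rest) n) "")) := by
  rw [datacat2Loop.eq_def]

theorem groups_eq (xs : List Int) :
    groups xs = (PySem.Set.ofList xs).map (fun k => (k, (PySem.List.count xs k : Int))) := by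
  match xs with
  | [] => simp [groups_nil]
  | n :: rest =>
    rw [groups_cons, ofList_cons_filter, List.map_cons]
    congr 1
    rw [groups_eq (rest.filter (fun m => m != n))]
    apply List.map_congr_left
    intro k hk
    have hk' : k ∈ rest.filter (fun m => m != n) := by
      simpa using (PySem.Set.mem_ofList _ _).mp hk
    have hkn : k ≠ n := by simpa using (List.of_mem_filter hk')
    simp only [PySem.List.count_eq]
    congr 1
    rw [List.count_filter (by simp [hkn]), List.count_cons_of_ne hkn.symm]
termination_by xs.length
decreasing_by
  simpa using Nat.lt_succ_of_le (List.length_filter_le _ rest)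

-- loop invariant: the loop appends the mapped groups to the accumulated items
theorem loop_items (xs : List Int) (d : PySem.Dict Int String)
    (h : ∀ k ∈ xs, d.contains k = false) :
    (datacat2Loop xs d).items
      = d.items ++ (groups xs).map (fun p => (p.1, numToEng.getD p.2 "")) := by
  match xs with
  | [] => simp [datacat2Loop_nil, groups_nil]
  | n :: rest =>
    rw [datacat2Loop_cons, groups_cons, List.map_cons]
    have hn : d.contains n = false := h n List.mem_cons_self
    have hstep := loop_items (rest.filter (fun m => m != n))
      (d.insert n (numToEng.getD (PySem.List.count (n :: rest) n) ""))
      (by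
        intro k hk
        have hkn : k ≠ n := by simpa using (List.of_mem_filter hk)
        have hkrest : k ∈ rest := List.mem_of_mem_filter hk
        have := h k (List.mem_cons_of_mem _ hkrest)
        simp [PySem.Dict.contains_insert, this, hkn])
    rw [hstep, PySem.Dict.items_insert_of_not_contains _ _ hn]
    simp
termination_by xs.length
decreasing_by
  simpa using Nat.lt_succ_of_le (List.length_filter_le _ rest)

theorem datacat2_eq (L : List String) :
    datacat2 L = datacat2_alt L := by
  simp only [datacat2, datacat2_alt]
  have hstep : (L.foldl (fun d l =>
      if d.contains (PySem.Str.len l) then d.modify (PySem.Str.len l) 0 (· + 1)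
      else d.insert (PySem.Str.len l) 1) PySem.Dict.empty)
      = PySem.Dict.counter (L.map PySem.Str.len) := by
    rw [PySem.Dict.counter_eq_foldl, List.foldl_map]
    exact PySem.List.foldl_congr_mem L _ _ _
      (fun d l _ => tally_step_eq_modify d (PySem.Str.len l))
  rw [hstep, PySem.Dict.items_counter]
  rw [loop_items (L.map PySem.Str.len) PySem.Dict.empty (by intro k _; rfl)]
  rw [groups_eq]
  simp [PySem.List.count_eq, Function.comp_def, PySem.Dict.empty]

-- ===== VERDICT (by name: the statement is the Claim_ definition above) =====
theorem datacat2_spec : Claim_equal_datacat2 := by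
  intro L _ _
  unfold Spec_datacat2
  exact datacat2_eq L
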